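-- pv_equiv track=rewrite | github.com/d-led/my-mvg-departures | src/mvg_departures/cli.py | _filter_stations_by_query
-- ===== SOURCE A (Python) =====
-- from typing import TYPE_CHECKING, Any
--
-- def _filter_stations_by_query(
--     all_stations: list[dict[str, Any]], query: str, existing_ids: set[str]
-- ) -> list[dict[str, Any]]:
--     """Filter stations by query string."""
--     query_lower = query.lower()
--     matches = [
--         s
--         for s in all_stations
--         if query_lower in s.get("name", "").lower() or query_lower in s.get("place", "").lower()
--     ]
--     return [match for match in matches[:20] if match.get("id") not in existing_ids]
-- ===== SOURCE B (Python) =====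
-- def _filter_stations_by_query(all_stations, query, existing_ids):
--     """Filter stations by query string (single early-terminating scan)."""
--     q = query.lower()
--     result = []
--     count = 0
--     for s in all_stations:
--         if q in s.get("name", "").lower() or q in s.get("place", "").lower():
--             count += 1
--             if s.get("id") not in existing_ids:
--                 result.append(s)
--             if count == 20:
--                 break
--     return result
-- ===== Notes on version B (the rewrite author's own statement) =====
-- stated objective: alternative
-- what changed: Replaces the two list comprehensions plus [:20] slice with one early-terminating loop that keeps a match counter (advanced on every substring match, breaking at 20) and appends a match to the result only if its id is not already in existing_ids.
import Mathlib
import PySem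

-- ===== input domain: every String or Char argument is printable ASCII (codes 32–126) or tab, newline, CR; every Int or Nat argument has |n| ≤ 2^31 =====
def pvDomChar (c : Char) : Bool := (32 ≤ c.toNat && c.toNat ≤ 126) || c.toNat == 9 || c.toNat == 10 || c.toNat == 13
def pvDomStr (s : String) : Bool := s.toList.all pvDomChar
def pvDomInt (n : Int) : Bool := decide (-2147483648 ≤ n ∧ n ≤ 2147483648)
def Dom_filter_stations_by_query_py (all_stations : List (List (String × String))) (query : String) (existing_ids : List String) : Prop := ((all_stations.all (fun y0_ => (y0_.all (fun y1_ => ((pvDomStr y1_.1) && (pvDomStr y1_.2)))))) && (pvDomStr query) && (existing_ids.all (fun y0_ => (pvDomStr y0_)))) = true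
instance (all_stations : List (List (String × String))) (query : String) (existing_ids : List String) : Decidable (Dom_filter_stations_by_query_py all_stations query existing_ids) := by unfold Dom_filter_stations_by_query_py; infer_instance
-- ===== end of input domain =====

-- B fuses A's two comprehensions and the [:20] slice into one early-terminating scan with a
-- match counter (alternative decomposition; same result).

-- ===== PORT A =====
-- the comprehension's condition: query_lower in s.get("name","").lower() or … "place" …
def pvMatchA (query_lower : String) (s : List (String × String)) : Bool :=
  PySem.Str.isIn query_lower (PySem.Str.lower (PySem.Dict.getD (PySem.Dict.mk s) "name" "")) ||
  PySem.Str.isIn query_lower (PySem.Str.lower (PySem.Dict.getD (PySem.Dict.mk s) "place" ""))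

-- match.get("id") not in existing_ids  (None, i.e. a missing "id", is never in a set of strings)
def pvKeepA (existing_ids : List String) (s : List (String × String)) : Bool :=
  match PySem.Dict.get? (PySem.Dict.mk s) "id" with
  | none => true
  | some i => !(PySem.Set.contains existing_ids i)

def filter_stations_by_query_py (all_stations : List (List (String × String))) (query : String) (existing_ids : List String) : List (List (String × String)) :=
  let query_lower := PySem.Str.lower query
  let ms := all_stations.filter (fun s => pvMatchA query_lower s)
  (PySem.List.slice ms none (some 20)).filter (fun m => pvKeepA existing_ids m)

-- ===== PORT B =====
-- the for-loop of Source B: count advances on every substring match, break at 20; a match is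
-- appended only if its id is not in existing_ids.
def pvAltLoop (q : String) (existing_ids : List String) : List (List (String × String)) → Nat → List (List (String × String))
  | [], _ => []
  | s :: rest, count =>
    if pvMatchA q s then
      let count' := count + 1
      let hd := if pvKeepA existing_ids s then [s] else []
      if count' == 20 then hd else hd ++ pvAltLoop q existing_ids rest count'
    else pvAltLoop q existing_ids rest count

def filter_stations_by_query_py_alt (all_stations : List (List (String × String))) (query : String) (existing_ids : List String) : List (List (String × String)) :=
  pvAltLoop (PySem.Str.lower query) existing_ids all_stations 0

-- ===== PRECONDITION & SPEC =====
def Spec_filter_stations_by_query_py (all_stations : List (List (String × String))) (query : String) (existing_ids : List String) (out : List (List (String × String))) : Prop := out = filter_stations_by_query_py_alt all_stations query existing_ids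
instance (all_stations : List (List (String × String))) (query : String) (existing_ids : List String) (out : List (List (String × String))) : Decidable (Spec_filter_stations_by_query_py all_stations query existing_ids out) := by unfold Spec_filter_stations_by_query_py; infer_instance

-- ===== CLAIM (what is proved, stated in full; the proofs are below) =====
def Claim_equal_filter_stations_by_query_py : Prop := ∀ (all_stations : List (List (String × String))) (query : String) (existing_ids : List String), Dom_filter_stations_by_query_py all_stations query existing_ids → Spec_filter_stations_by_query_py all_stations query existing_ids (filter_stations_by_query_py all_stations query existing_ids)

-- ===== LEMMAS AND PROOFS =====

-- the loop with counter c (c < 20) equals: take the first 20-c matches, then id-filter them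
theorem pvAltLoop_eq (q : String) (eids : List String) :
    ∀ (xs : List (List (String × String))) (c : Nat), c < 20 →
      pvAltLoop q eids xs c =
        (((xs.filter (fun s => pvMatchA q s)).take (20 - c)).filter (fun s => pvKeepA eids s)) := by
  intro xs
  induction xs with
  | nil => intro c _; simp [pvAltLoop]
  | cons s rest ih =>
    intro c hc
    by_cases hm : pvMatchA q s
    · have htake : (20 - c) = (20 - (c + 1)) + 1 := by omega
      by_cases h19 : c + 1 = 20
      · have : 20 - c = 1 := by omega
        simp [pvAltLoop, hm, h19, this, List.filter_cons]
      · have hc' : c + 1 < 20 := by omega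
        rw [List.filter_cons_of_pos (by simpa using hm), htake, List.take_succ_cons]
        simp only [pvAltLoop, hm, if_pos, beq_iff_eq, h19, if_false, ih (c + 1) hc', List.filter_cons]
        by_cases hk : pvKeepA eids s <;> simp [hk]
    · simp [pvAltLoop, hm, List.filter_cons_of_neg (by simpa using hm), ih c hc]

-- ===== VERDICT (by name: the statement is the Claim_ definition above) =====
theorem filter_stations_by_query_py_spec : Claim_equal_filter_stations_by_query_py := by
  intro all_stations query existing_ids _
  unfold Spec_filter_stations_by_query_py filter_stations_by_query_py filter_stations_by_query_py_alt
  rw [pvAltLoop_eq _ _ _ 0 (by omega)]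
  norm_num [PySem.List.slice_to]
  rfl
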